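-- pv_equiv track=rewrite | github.com/EnvOpen/pyLocalEngine | localengine/core/locale_detector.py | get_fallback_locales
-- ===== SOURCE A (Python) =====
-- from typing import List, Optional
--
-- def get_fallback_locales(primary_locale: str) -> List[str]:
--     """
--     Get a list of fallback locales for the given primary locale.
--
--     Args:
--         primary_locale: The primary locale (e.g., 'en-US')
--
--     Returns:
--         List[str]: List of fallback locales in order of preference
--     """
--     fallbacks = []
--
--     if "-" in primary_locale:
--         # Add language-only version (e.g., 'en-US' -> 'en')
--         language = primary_locale.split("-")[0]
--         fallbacks.append(language)
--
--         # Add common variants for the language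
--         common_variants = {
--             "en": ["en-US", "en-GB"],
--             "es": ["es-ES", "es-MX"],
--             "fr": ["fr-FR", "fr-CA"],
--             "de": ["de-DE", "de-AT"],
--             "pt": ["pt-PT", "pt-BR"],
--             "zh": ["zh-CN", "zh-TW"],
--         }
--
--         if language in common_variants:
--             for variant in common_variants[language]:
--                 if variant != primary_locale and variant not in fallbacks:
--                     fallbacks.append(variant)
--
--     # Always include English as final fallback
--     if "en-US" not in fallbacks and primary_locale != "en-US":
--         fallbacks.append("en-US")
--     if "en" not in fallbacks and primary_locale != "en":
--         fallbacks.append("en")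
--
--     return fallbacks
-- ===== SOURCE B (Python) =====
-- from typing import List, Optional
--
-- # Partially evaluated fallback chains: the language head plus its variants and
-- # the English fallbacks, already deduplicated at table-construction time.
-- _CHAINS = {
--     "en": ["en", "en-US", "en-GB"],
--     "es": ["es", "es-ES", "es-MX", "en-US", "en"],
--     "fr": ["fr", "fr-FR", "fr-CA", "en-US", "en"],
--     "de": ["de", "de-DE", "de-AT", "en-US", "en"],
--     "pt": ["pt", "pt-PT", "pt-BR", "en-US", "en"],
--     "zh": ["zh", "zh-CN", "zh-TW", "en-US", "en"],
-- }
--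
-- def get_fallback_locales(primary_locale: str) -> List[str]:
--     """Look up the precomputed duplicate-free chain, then drop the primary locale."""
--     if "-" in primary_locale:
--         language = primary_locale.split("-")[0]
--         chain = _CHAINS.get(language, [language, "en-US", "en"])
--     else:
--         chain = ["en-US", "en"]
--     return [x for x in chain if x != primary_locale]
-- ===== Notes on version B (the rewrite author's own statement) =====
-- stated objective: simpler
-- what changed: B partially evaluates A's table and dedup logic into a precomputed duplicate-free chain per language (default [language,'en-US','en'], or ['en-US','en'] with no dash) and at runtime only filters out the primary locale, removing all membership tests and conditional appends.
import Mathlib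
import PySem

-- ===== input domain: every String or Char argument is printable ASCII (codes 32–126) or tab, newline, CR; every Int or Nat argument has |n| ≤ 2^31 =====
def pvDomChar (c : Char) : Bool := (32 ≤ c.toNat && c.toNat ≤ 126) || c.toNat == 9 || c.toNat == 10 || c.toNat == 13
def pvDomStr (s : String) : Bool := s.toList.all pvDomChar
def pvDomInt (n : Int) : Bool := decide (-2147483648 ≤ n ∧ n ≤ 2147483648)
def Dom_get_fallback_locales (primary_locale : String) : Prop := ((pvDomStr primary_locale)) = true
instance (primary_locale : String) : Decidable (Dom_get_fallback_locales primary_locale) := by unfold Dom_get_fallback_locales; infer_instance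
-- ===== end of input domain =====

-- B replaces A's dedup-while-appending logic by a precomputed duplicate-free chain per language plus one filter dropping the primary locale (simpler decomposition, same values).
-- ===== PORT A =====
def get_fallback_locales (primary_locale : String) : List String :=
  let fallbacks : List String := []
  let fallbacks :=
    if PySem.Str.isIn "-" primary_locale then
      -- primary_locale.split("-")[0]: split? with sep "-" ≠ "" is always some, and the list is nonempty, so the defaults are never taken
      let language := PySem.List.pyGetD (((PySem.Str.split? primary_locale "-").getD [])) 0 ""
      let fallbacks := fallbacks ++ [language]
      let common_variants : PySem.Dict String (List String) := PySem.Dict.ofList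
        [("en", ["en-US", "en-GB"]), ("es", ["es-ES", "es-MX"]), ("fr", ["fr-FR", "fr-CA"]),
         ("de", ["de-DE", "de-AT"]), ("pt", ["pt-PT", "pt-BR"]), ("zh", ["zh-CN", "zh-TW"])]
      if common_variants.contains language then
        (common_variants.getD language []).foldl
          (fun fb variant =>
            if variant ≠ primary_locale ∧ variant ∉ fb then fb ++ [variant] else fb)
          fallbacks
      else fallbacks
    else fallbacks
  let fallbacks :=
    if "en-US" ∉ fallbacks ∧ primary_locale ≠ "en-US" then fallbacks ++ ["en-US"] else fallbacks
  if "en" ∉ fallbacks ∧ primary_locale ≠ "en" then fallbacks ++ ["en"] else fallbacks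

-- ===== PORT B =====
def get_fallback_locales_alt (primary_locale : String) : List String :=
  let chains : PySem.Dict String (List String) := PySem.Dict.ofList
    [("en", ["en", "en-US", "en-GB"]),
     ("es", ["es", "es-ES", "es-MX", "en-US", "en"]),
     ("fr", ["fr", "fr-FR", "fr-CA", "en-US", "en"]),
     ("de", ["de", "de-DE", "de-AT", "en-US", "en"]),
     ("pt", ["pt", "pt-PT", "pt-BR", "en-US", "en"]),
     ("zh", ["zh", "zh-CN", "zh-TW", "en-US", "en"])]
  let chain : List String :=
    if PySem.Str.isIn "-" primary_locale then
      let language := PySem.List.pyGetD (((PySem.Str.split? primary_locale "-").getD [])) 0 ""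
      chains.getD language [language, "en-US", "en"]
    else ["en-US", "en"]
  chain.filter (fun x => x != primary_locale)

-- ===== PRECONDITION & SPEC =====
def Spec_get_fallback_locales (primary_locale : String) (out : List String) : Prop := out = get_fallback_locales_alt primary_locale
instance (primary_locale : String) (out : List String) : Decidable (Spec_get_fallback_locales primary_locale out) := by unfold Spec_get_fallback_locales; infer_instance

-- ===== CLAIM (what is proved, stated in full; the proofs are below) =====
def Claim_equal_get_fallback_locales : Prop := ∀ (primary_locale : String), Dom_get_fallback_locales primary_locale → Spec_get_fallback_locales primary_locale (get_fallback_locales primary_locale)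

-- ===== LEMMAS AND PROOFS =====

-- A's interleaved append step.
def pvStep (p : String) (fb : List String) (x : String) : List String :=
  if x ≠ p ∧ x ∉ fb then fb ++ [x] else fb

-- keep-first deduplication relative to an already-seen list
def pvDedup (seen : List String) : List String → List String
  | [] => []
  | x :: xs => if x ∈ seen then pvDedup seen xs else x :: pvDedup (x :: seen) xs

-- A's pvStep fold is dedup-then-filter, as long as seen and acc agree away from p.
theorem pvDedup_fold (p : String) : ∀ (cand acc seen : List String),
    (∀ x, x ≠ p → (x ∈ seen ↔ x ∈ acc)) → p ∉ acc →
    List.foldl (pvStep p) acc cand = acc ++ (pvDedup seen cand).filter (fun x => x != p) := by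
  intro cand
  induction cand with
  | nil => intro acc seen _ _; simp [pvDedup]
  | cons x xs ih =>
    intro acc seen h hp
    simp only [List.foldl_cons, pvDedup]
    by_cases hxp : x = p
    · subst hxp
      rw [pvStep, if_neg (by tauto)]
      by_cases hs : x ∈ seen
      · rw [if_pos hs]; exact ih acc seen h hp
      · rw [if_neg hs]
        rw [List.filter_cons, if_neg (by simp)]
        refine ih acc (x :: seen) ?_ hp
        intro y hy
        simp only [List.mem_cons, h y hy]
        tauto
    · by_cases hxa : x ∈ acc
      · have hs : x ∈ seen := (h x hxp).mpr hxa
        rw [pvStep, if_neg (by tauto), if_pos hs]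
        exact ih acc seen h hp
      · have hs : x ∉ seen := fun hmem => hxa ((h x hxp).mp hmem)
        rw [pvStep, if_pos ⟨hxp, hxa⟩, if_neg hs]
        rw [List.filter_cons, if_pos (by simp [hxp])]
        rw [ih (acc ++ [x]) (x :: seen) ?_ (by simp [hp]; exact fun hpe => hxp hpe.symm)]
        · simp
        · intro y hy
          simp only [List.mem_cons, List.mem_append, h y hy]
          tauto

-- head of splitOn.go once something is already in the accumulator
theorem pvGoAccHead (sep : List Char) : ∀ (fuel : Nat) (l cur : List Char)
    (acc : List (List Char)) (x d : List Char),
    (PySem.Chars.splitOn.go sep fuel l cur (acc ++ [x])).headD d = x := by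
  intro fuel
  induction fuel with
  | zero => intro l cur acc x d; simp [PySem.Chars.splitOn.go]
  | succ n ih =>
    intro l cur acc x d
    cases l with
    | nil => simp [PySem.Chars.splitOn.go]
    | cons c rest =>
      rw [PySem.Chars.splitOn.go]
      split_ifs with hpre
      · rw [show PySem.Chars.splitOn.go sep n (List.drop sep.length (c :: rest)) []
              (cur.reverse :: (acc ++ [x]))
            = PySem.Chars.splitOn.go sep n (List.drop sep.length (c :: rest)) []
              ((cur.reverse :: acc) ++ [x]) from rfl]
        exact ih _ _ _ _ _
      · exact ih _ _ _ _ _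

-- the FIRST piece of a split on "-" contains no '-'
theorem pvGoFirst : ∀ (fuel : Nat) (l cur : List Char), l.length < fuel → '-' ∉ cur →
    '-' ∉ (PySem.Chars.splitOn.go ['-'] fuel l cur []).headD [] := by
  intro fuel
  induction fuel with
  | zero => intro l cur h; omega
  | succ n ih =>
    intro l cur hf hc
    cases l with
    | nil => simp [PySem.Chars.splitOn.go, hc]
    | cons c rest =>
      rw [PySem.Chars.splitOn.go]
      split_ifs with hpre
      · rw [show (cur.reverse :: ([] : List (List Char))) = [] ++ [cur.reverse] from rfl,
            pvGoAccHead]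
        simpa using hc
      · have hcne : c ≠ '-' := by
          simp [List.isPrefixOf] at hpre
          exact fun h => hpre (h.symm)
        exact ih rest (c :: cur) (by simp at hf ⊢; omega)
          (by simp [hc]; exact fun h => hcne h.symm)

-- the language piece primary_locale.split("-")[0] never contains '-'
theorem pvLangNoDash (p : String) :
    '-' ∉ (PySem.List.pyGetD ((PySem.Str.split? p "-").getD []) 0 "").toList := by
  have hsplit : (PySem.Str.split? p "-").getD []
      = (PySem.Chars.splitOn p.toList ['-']).map String.ofList := by
    simp [PySem.Str.split?, PySem.Chars.split?]
  have hfirst : '-' ∉ (PySem.Chars.splitOn p.toList ['-']).headD [] :=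
    pvGoFirst _ _ [] (by omega) (by simp)
  rw [hsplit]
  cases hlst : PySem.Chars.splitOn p.toList ['-'] with
  | nil => decide
  | cons h t =>
    rw [hlst] at hfirst
    simp only [PySem.List.pyGetD]
    simpa using hfirst

-- the language piece is never primary_locale itself when "-" occurs in it
theorem pvLangNe (p : String) (hd : PySem.Str.isIn "-" p = true) :
    PySem.List.pyGetD ((PySem.Str.split? p "-").getD []) 0 "" ≠ p := by
  have hp : '-' ∈ p.toList := by
    rw [PySem.Str.isIn_iff_infix] at hd
    obtain ⟨u, v, h⟩ := hd
    rw [← h]; simp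
  intro heq
  exact pvLangNoDash p (by rw [heq]; exact hp)

-- ===== VERDICT (by name: the statement is the Claim_ definition above) =====
-- A's tail (unconditional L, the variants loop, the two English appends) is dedup-then-filter of L :: vs ++ ["en-US","en"]
theorem pvKnown (p L : String) (vs rest : List String) (hLp : L ≠ p)
    (hd : pvDedup [L] (vs ++ ["en-US", "en"]) = rest) :
    (if "en" ∉ (if "en-US" ∉ List.foldl (fun fb variant => if variant ≠ p ∧ variant ∉ fb then fb ++ [variant] else fb) ([] ++ [L]) vs ∧ p ≠ "en-US" then List.foldl (fun fb variant => if variant ≠ p ∧ variant ∉ fb then fb ++ [variant] else fb) ([] ++ [L]) vs ++ ["en-US"] else List.foldl (fun fb variant => if variant ≠ p ∧ variant ∉ fb then fb ++ [variant] else fb) ([] ++ [L]) vs) ∧ p ≠ "en" then (if "en-US" ∉ List.foldl (fun fb variant => if variant ≠ p ∧ variant ∉ fb then fb ++ [variant] else fb) ([] ++ [L]) vs ∧ p ≠ "en-US" then List.foldl (fun fb variant => if variant ≠ p ∧ variant ∉ fb then fb ++ [variant] else fb) ([] ++ [L]) vs ++ ["en-US"] else List.foldl (fun fb variant => if variant ≠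 p ∧ variant ∉ fb then fb ++ [variant] else fb) ([] ++ [L]) vs) ++ ["en"] else (if "en-US" ∉ List.foldl (fun fb variant => if variant ≠ p ∧ variant ∉ fb then fb ++ [variant] else fb) ([] ++ [L]) vs ∧ p ≠ "en-US" then List.foldl (fun fb variant => if variant ≠ p ∧ variant ∉ fb then fb ++ [variant] else fb) ([] ++ [L]) vs ++ ["en-US"] else List.foldl (fun fb variant => if variant ≠ p ∧ variant ∉ fb then fb ++ [variant] else fb) ([] ++ [L]) vs))
      = List.filter (fun x => x != p) (L :: rest) := by
  have hstep : ∀ (F : List String) (x : String),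
      (if x ∉ F ∧ p ≠ x then F ++ [x] else F) = pvStep p F x := by
    intro F x; rw [pvStep]; split_ifs <;> first | rfl | tauto
  rw [hstep, hstep]
  have hfold : List.foldl (fun fb variant => if variant ≠ p ∧ variant ∉ fb then fb ++ [variant] else fb) ([] ++ [L]) vs
      = List.foldl (pvStep p) [L] vs := rfl
  rw [hfold]
  have hrefold : pvStep p (pvStep p (List.foldl (pvStep p) [L] vs) "en-US") "en"
      = List.foldl (pvStep p) [L] (vs ++ ["en-US", "en"]) := by
    rw [List.foldl_append]; rfl
  rw [hrefold,
    pvDedup_fold p _ [L] [L] (fun _ _ => Iff.rfl) (by simpa using Ne.symm hLp), hd]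
  rw [List.filter_cons, if_pos (by simp [hLp])]
  simp

theorem get_fallback_locales_spec : Claim_equal_get_fallback_locales := by
  intro p _
  unfold Spec_get_fallback_locales get_fallback_locales get_fallback_locales_alt
  by_cases hdash : PySem.Str.isIn "-" p
  · have hnd := pvLangNoDash p
    have hLp := pvLangNe p hdash
    simp only [hdash, if_true]
    generalize PySem.List.pyGetD ((PySem.Str.split? p "-").getD []) 0 "" = L at hnd hLp ⊢
    by_cases hk : (PySem.Dict.ofList
        [("en", ["en-US", "en-GB"]), ("es", ["es-ES", "es-MX"]), ("fr", ["fr-FR", "fr-CA"]),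
         ("de", ["de-DE", "de-AT"]), ("pt", ["pt-PT", "pt-BR"]), ("zh", ["zh-CN", "zh-TW"])]
        : PySem.Dict String (List String)).contains L = true
    · rw [if_pos hk]
      have hkeys : L ∈ (["en", "es", "fr", "de", "pt", "zh"] : List String) := by
        rw [PySem.Dict.contains_eq_decide_mem_keys,
          show (PySem.Dict.ofList
            [("en", ["en-US", "en-GB"]), ("es", ["es-ES", "es-MX"]), ("fr", ["fr-FR", "fr-CA"]),
             ("de", ["de-DE", "de-AT"]), ("pt", ["pt-PT", "pt-BR"]), ("zh", ["zh-CN", "zh-TW"])]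
            : PySem.Dict String (List String)).keys = ["en", "es", "fr", "de", "pt", "zh"]
          from by decide] at hk
        simpa using hk
      simp only [List.mem_cons, List.not_mem_nil, or_false] at hkeys
      rcases hkeys with rfl | rfl | rfl | rfl | rfl | rfl <;>
        exact (pvKnown p _ _ _ hLp rfl).trans (by congr 1)
    · rw [if_neg hk]
      have hmem : L ∉ (["en", "es", "fr", "de", "pt", "zh"] : List String) := by
        intro hm
        apply hk
        rw [PySem.Dict.contains_eq_decide_mem_keys,
          show (PySem.Dict.ofList
            [("en", ["en-US", "en-GB"]), ("es", ["es-ES", "es-MX"]), ("fr", ["fr-FR", "fr-CA"]),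
             ("de", ["de-DE", "de-AT"]), ("pt", ["pt-PT", "pt-BR"]), ("zh", ["zh-CN", "zh-TW"])]
            : PySem.Dict String (List String)).keys = ["en", "es", "fr", "de", "pt", "zh"]
          from by decide]
        simpa using hm
      have h1 : ("en-US" : String) ≠ L := fun e => hnd (e ▸ (by decide : '-' ∈ "en-US".toList))
      have h2 : ("en" : String) ≠ L := fun e => hmem (e ▸ (by decide : ("en" : String) ∈ ["en", "es", "fr", "de", "pt", "zh"]))
      have hk2 : (PySem.Dict.ofList
          [("en", ["en", "en-US", "en-GB"]),
           ("es", ["es", "es-ES", "es-MX", "en-US", "en"]),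
           ("fr", ["fr", "fr-FR", "fr-CA", "en-US", "en"]),
           ("de", ["de", "de-DE", "de-AT", "en-US", "en"]),
           ("pt", ["pt", "pt-PT", "pt-BR", "en-US", "en"]),
           ("zh", ["zh", "zh-CN", "zh-TW", "en-US", "en"])]
          : PySem.Dict String (List String)).contains L = false := by
        rw [PySem.Dict.contains_eq_decide_mem_keys,
          show (PySem.Dict.ofList
            [("en", ["en", "en-US", "en-GB"]),
             ("es", ["es", "es-ES", "es-MX", "en-US", "en"]),
             ("fr", ["fr", "fr-FR", "fr-CA", "en-US", "en"]),
             ("de", ["de", "de-DE", "de-AT", "en-US", "en"]),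
             ("pt", ["pt", "pt-PT", "pt-BR", "en-US", "en"]),
             ("zh", ["zh", "zh-CN", "zh-TW", "en-US", "en"])]
            : PySem.Dict String (List String)).keys = ["en", "es", "fr", "de", "pt", "zh"]
          from by decide]
        simpa using hmem
      refine (pvKnown p L [] _ hLp rfl).trans ?_
      rw [PySem.Dict.getD_of_not_contains _ _ hk2]
      congr 1
      simp [pvDedup, h1, h2]
  · simp only [Bool.not_eq_true] at hdash
    simp only [hdash, Bool.false_eq_true, if_false]
    have hstep : ∀ (F : List String) (x : String),
        (if x ∉ F ∧ p ≠ x then F ++ [x] else F) = pvStep p F x := by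
      intro F x; rw [pvStep]; split_ifs <;> first | rfl | tauto
    rw [hstep, hstep]
    have hrefold : pvStep p (pvStep p [] "en-US") "en"
        = List.foldl (pvStep p) [] ["en-US", "en"] := rfl
    rw [hrefold, pvDedup_fold p _ [] [] (fun _ _ => Iff.rfl) (by simp)]
    rw [show pvDedup [] ["en-US", "en"] = ["en-US", "en"] from by decide]
    simp
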